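-- pv_equiv track=rewrite | github.com/981377660LMT/algorithm-study | 7_graph/经典题/LCP 20. 快速公交-反向搜索.py | busRapidTransit
-- ===== SOURCE A (Python) =====
-- from functools import lru_cache
-- from typing import List
--
-- MOD = int(1e9 + 7)
--
-- def busRapidTransit(
--     target: int, inc: int, dec: int, jump: List[int], cost: List[int]
-- ) -> int:
--     """0到target的最少花费  用终点向起点递归
--     最终目标 target 的范围在 [1, 10^9]，
--     所以仅通过正向 BFS 最坏情况下要遍历全部位置，会超时。所以我们考虑`反向 BFS`
--     注意不能遍历全部位置 因此要先坐车再走路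
--
--     1 <= jump.length, cost.length <= 10
--     1 <= target <= 10^9
--     2 <= jump[i] <= 10^6
--     1 <= inc, dec, cost[i] <= 10^6
--     """
--
--     @lru_cache(None)
--     def dfs(pos: int) -> int:
--         if pos == 0:
--             return 0
--         if pos == 1:
--             return inc
--         res = pos * inc
--         for J, C in zip(jump, cost):
--             div, mod = divmod(pos, J)
--             res = min(res, (dfs(div) + C + inc * mod))
--             if mod != 0:
--                 res = min(res, dfs(div + 1) + C + dec * (J - mod))
--
--         # 注意这里不能模mod 因为是比大小
--         return res
--
--     return dfs(target) % MOD
-- ===== SOURCE B (Python) =====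
-- MOD = int(1e9 + 7)
--
-- def busRapidTransit(target, inc, dec, jump, cost):
--     # Phase 1: enumerate all positions reachable from target by the
--     # backward jumps (pos -> pos//J, and pos//J+1 when pos%J != 0).
--     seen = set()
--
--     def collect(pos):
--         if pos <= 1 or pos in seen:
--             return
--         seen.add(pos)
--         for J, _ in zip(jump, cost):
--             div, mod = divmod(pos, J)
--             collect(div)
--             if mod != 0:
--                 collect(div + 1)
--
--     collect(target)
--
--     # Phase 2: bottom-up DP over the reachable states in increasing order
--     # (every successor of a state is strictly smaller, so it is ready).
--     dp = {0: 0, 1: inc}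
--     for pos in sorted(seen):
--         best = pos * inc
--         for J, C in zip(jump, cost):
--             div, mod = divmod(pos, J)
--             best = min(best, dp[div] + C + inc * mod)
--             if mod != 0:
--                 best = min(best, dp[div + 1] + C + dec * (J - mod))
--         dp[pos] = best
--     return dp[target] % MOD
-- ===== Notes on version B (the rewrite author's own statement) =====
-- stated objective: alternative
-- what changed: A memoizes a top-down recursion from target; B first enumerates the reachable state set with an explicit recursive collector and then fills a bottom-up DP table over the states in increasing numeric order, taking the final value from the table.
-- outside the precondition, e.g. on busRapidTransit(-13, 4, 2, [-2, 1, -3], []): A returns 999999955, B raises KeyError; on busRapidTransit(7, 4, 4, [-3, 2], [1]): A returns 999999988, B raises KeyError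
import Mathlib
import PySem

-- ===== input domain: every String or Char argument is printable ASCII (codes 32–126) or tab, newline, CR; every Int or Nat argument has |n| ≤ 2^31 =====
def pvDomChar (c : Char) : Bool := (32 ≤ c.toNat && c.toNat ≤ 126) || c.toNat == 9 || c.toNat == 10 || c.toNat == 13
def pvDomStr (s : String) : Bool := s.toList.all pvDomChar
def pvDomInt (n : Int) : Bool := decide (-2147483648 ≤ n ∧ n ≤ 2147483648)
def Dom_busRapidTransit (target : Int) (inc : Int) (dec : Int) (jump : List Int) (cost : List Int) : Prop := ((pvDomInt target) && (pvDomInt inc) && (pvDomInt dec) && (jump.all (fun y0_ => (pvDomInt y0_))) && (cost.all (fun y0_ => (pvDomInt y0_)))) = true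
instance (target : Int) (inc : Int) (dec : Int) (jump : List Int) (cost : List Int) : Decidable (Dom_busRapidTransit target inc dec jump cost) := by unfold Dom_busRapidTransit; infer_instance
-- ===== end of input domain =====

-- B replaces A's memoized top-down recursion by (1) an explicit recursive enumeration of the
-- reachable backward-jump states and (2) a bottom-up DP over those states in increasing order
-- (objective: alternative decomposition, same cost).

-- ===== PORT A =====
-- A's dfs is an lru_cache'd recursion; the port threads the cache as an explicit dict and
-- carries a fuel argument (depth of A's recursion on admitted inputs is bounded by target,
-- so fuel target.toNat+1 reproduces it exactly).
def dfsA (inc : Int) (dec : Int) (jc : List (Int × Int)) : Nat → Int → PySem.Dict Int Int → Int × PySem.Dict Int Int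
  | 0, _, memo => (0, memo)
  | fuel+1, pos, memo =>
    match memo.get? pos with
    | some v => (v, memo)
    | none =>
      if pos = 0 then (0, memo.insert pos 0)
      else if pos = 1 then (inc, memo.insert pos inc)
      else
        let r := jc.foldl (fun (acc : Int × PySem.Dict Int Int) p =>
          let dv := PySem.Int.floordiv pos p.1
          let md := PySem.Int.mod pos p.1
          let r1 := dfsA inc dec jc fuel dv acc.2
          let res1 := min acc.1 (r1.1 + p.2 + inc * md)
          if md ≠ 0 then
            let r2 := dfsA inc dec jc fuel (dv + 1) r1.2
            (min res1 (r2.1 + p.2 + dec * (p.1 - md)), r2.2)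
          else (res1, r1.2)) (pos * inc, memo)
        (r.1, r.2.insert pos r.1)

def busRapidTransit (target : Int) (inc : Int) (dec : Int) (jump : List Int) (cost : List Int) : Int :=
  PySem.Int.mod (dfsA inc dec (jump.zip cost) (target.toNat + 1) target PySem.Dict.empty).1 1000000007

-- ===== PORT B =====
-- phase 1 of Source B: recursive collector of the reachable states (fuel bounds the recursion
-- depth exactly as for A; Python needs none because positions strictly decrease).
def collectB (jc : List (Int × Int)) : Nat → Int → List Int → List Int
  | 0, _, seen => seen
  | fuel+1, pos, seen =>
    if pos ≤ 1 ∨ PySem.Set.contains seen pos = true then seen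
    else jc.foldl (fun s p =>
      let dv := PySem.Int.floordiv pos p.1
      let md := PySem.Int.mod pos p.1
      let s1 := collectB jc fuel dv s
      if md ≠ 0 then collectB jc fuel (dv + 1) s1 else s1)
      (PySem.Set.add seen pos)

-- phase 2 of Source B: one DP-table update.  Python's dp[div] raises KeyError on a missing key;
-- under Pre_ every looked-up key is present, so the total getD _ 0 is exact there.
def dpStep (inc : Int) (dec : Int) (jc : List (Int × Int)) (dp : PySem.Dict Int Int) (pos : Int) : PySem.Dict Int Int :=
  dp.insert pos (jc.foldl (fun best p =>
    let dv := PySem.Int.floordiv pos p.1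
    let md := PySem.Int.mod pos p.1
    let b1 := min best (dp.getD dv 0 + p.2 + inc * md)
    if md ≠ 0 then min b1 (dp.getD (dv + 1) 0 + p.2 + dec * (p.1 - md)) else b1)
    (pos * inc))

def busRapidTransit_alt (target : Int) (inc : Int) (dec : Int) (jump : List Int) (cost : List Int) : Int :=
  let jc := jump.zip cost
  let seen := collectB jc (target.toNat + 1) target []
  let dp0 := (PySem.Dict.empty.insert (0 : Int) (0 : Int)).insert 1 inc
  let dp := (PySem.List.sorted seen (fun x => x) false).foldl (dpStep inc dec jc) dp0
  PySem.Int.mod (dp.getD target 0) 1000000007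

-- ===== PRECONDITION & SPEC =====
-- Pre_ restricts to the task's stated natural domain (0 ≤ target; every jump entry that is
-- paired with a cost is ≥ 2, unless target ≤ 1 where the jumps are never touched).  Outside it
-- A's recursion usually raises (RecursionError / ZeroDivisionError) but, e.g. for a negative
-- target with an empty zip, A still returns target*inc % MOD while B raises KeyError there.
def Pre_busRapidTransit (target : Int) (inc : Int) (dec : Int) (jump : List Int) (cost : List Int) : Prop :=
  0 ≤ target ∧ (target ≤ 1 ∨ ∀ p ∈ jump.zip cost, 2 ≤ p.1)
instance (target : Int) (inc : Int) (dec : Int) (jump : List Int) (cost : List Int) : Decidable (Pre_busRapidTransit target inc dec jump cost) := by unfold Pre_busRapidTransit; infer_instance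

def pvWitness_busRapidTransit : Int × Int × Int × List Int × List Int := (5, 1, 1, [2], [1])

def Spec_busRapidTransit (target : Int) (inc : Int) (dec : Int) (jump : List Int) (cost : List Int) (out : Int) : Prop := out = busRapidTransit_alt target inc dec jump cost
instance (target : Int) (inc : Int) (dec : Int) (jump : List Int) (cost : List Int) (out : Int) : Decidable (Spec_busRapidTransit target inc dec jump cost out) := by unfold Spec_busRapidTransit; infer_instance

-- ===== CLAIM (what is proved, stated in full; the proofs are below) =====
def Claim_equal_busRapidTransit : Prop := ∀ (target : Int) (inc : Int) (dec : Int) (jump : List Int) (cost : List Int), Dom_busRapidTransit target inc dec jump cost → Pre_busRapidTransit target inc dec jump cost → Spec_busRapidTransit target inc dec jump cost (busRapidTransit target inc dec jump cost)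

-- ===== LEMMAS AND PROOFS =====

-- proof-side helper: A's recursion without the cache (the cache only speeds it up)
def pvDfs (inc : Int) (dec : Int) (jc : List (Int × Int)) : Nat → Int → Int
  | 0, _ => 0
  | fuel+1, pos =>
    if pos = 0 then 0
    else if pos = 1 then inc
    else jc.foldl (fun res p =>
      let dv := PySem.Int.floordiv pos p.1
      let md := PySem.Int.mod pos p.1
      let res1 := min res (pvDfs inc dec jc fuel dv + p.2 + inc * md)
      if md ≠ 0 then min res1 (pvDfs inc dec jc fuel (dv + 1) + p.2 + dec * (p.1 - md)) else res1)
      (pos * inc)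


-- abbreviation for the collector's loop body (definitionally the lambda inside collectB)
def pvStep (jc : List (Int × Int)) (n : Nat) (pos : Int) (s : List Int) (p : Int × Int) : List Int :=
  let dv := PySem.Int.floordiv pos p.1
  let md := PySem.Int.mod pos p.1
  let s1 := collectB jc n dv s
  if md ≠ 0 then collectB jc n (dv + 1) s1 else s1

theorem collectB_succ (jc : List (Int × Int)) (n : Nat) (pos : Int) (seen : List Int) :
    collectB jc (n+1) pos seen =
      if pos ≤ 1 ∨ PySem.Set.contains seen pos = true then seen
      else jc.foldl (pvStep jc n pos) (PySem.Set.add seen pos) := rfl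

-- a generic foldl invariant preserver
theorem pvFoldlPres {α β : Type} (P : α → Prop) (step : α → β → α) :
    ∀ l : List β, (∀ s p, p ∈ l → P s → P (step s p)) → ∀ s, P s → P (l.foldl step s) := by
  intro l
  induction l with
  | nil => intro _ s hs; exact hs
  | cons q t ih =>
    intro h s hs
    exact ih (fun s p hp => h s p (List.mem_cons_of_mem _ hp)) _ (h s q (List.mem_cons_self) hs)

-- facts about one backward jump: for 2 ≤ J and 2 ≤ pos both children are ≥ 0 and < pos
theorem pvChild (J pos : Int) (hJ : 2 ≤ J) (hp : 2 ≤ pos) :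
    0 ≤ PySem.Int.floordiv pos J ∧ PySem.Int.floordiv pos J < pos ∧
    0 ≤ PySem.Int.mod pos J ∧ PySem.Int.mod pos J < J ∧
    (PySem.Int.mod pos J ≠ 0 → PySem.Int.floordiv pos J + 1 < pos) := by
  have h0 : 0 < J := by omega
  have hdm := PySem.Int.floordiv_mul_add_mod pos J
  have hdv : 0 ≤ PySem.Int.floordiv pos J := by
    rw [PySem.Int.floordiv_eq_ediv_of_pos h0]
    exact Int.ediv_nonneg (by omega) (by omega)
  have hm0 : 0 ≤ PySem.Int.mod pos J := by
    rw [PySem.Int.mod_eq_emod_of_pos h0]; exact Int.emod_nonneg pos (by omega)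
  have hm1 : PySem.Int.mod pos J < J := by
    rw [PySem.Int.mod_eq_emod_of_pos h0]; exact Int.emod_lt_of_pos pos h0
  have hlin : PySem.Int.floordiv pos J * 2 ≤ PySem.Int.floordiv pos J * J :=
    mul_le_mul_of_nonneg_left hJ hdv
  refine ⟨hdv, by nlinarith, hm0, hm1, fun hne => by
    have hm2 : 1 ≤ PySem.Int.mod pos J := lt_of_le_of_ne hm0 (Ne.symm hne)
    linarith⟩

-- pvDfs does not depend on the fuel once it exceeds pos
theorem pvDfs_mono (inc dec : Int) (jc : List (Int × Int)) (hJ : ∀ p ∈ jc, 2 ≤ p.1) :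
    ∀ f1 f2 : Nat, ∀ pos : Int, 0 ≤ pos → pos.toNat < f1 → pos.toNat < f2 →
      pvDfs inc dec jc f1 pos = pvDfs inc dec jc f2 pos := by
  intro f1
  induction f1 with
  | zero => intro f2 pos _ h1 _; omega
  | succ n ih =>
    intro f2 pos h0 h1 h2
    obtain ⟨m, rfl⟩ : ∃ m, f2 = m + 1 := ⟨f2 - 1, by omega⟩
    by_cases hp0 : pos = 0
    · simp [pvDfs, hp0]
    by_cases hp1 : pos = 1
    · simp [pvDfs, hp1]
    have hp2 : 2 ≤ pos := by omega
    simp only [pvDfs, hp0, hp1, if_false]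
    apply PySem.List.foldl_congr_mem
    intro acc p hp
    obtain ⟨hdv0, hdvlt, hm0, hmlt, hplus⟩ := pvChild p.1 pos (hJ p hp) hp2
    have e1 : pvDfs inc dec jc n (PySem.Int.floordiv pos p.1)
        = pvDfs inc dec jc m (PySem.Int.floordiv pos p.1) :=
      ih m _ hdv0 (by omega) (by omega)
    by_cases hmd : PySem.Int.mod pos p.1 = 0
    · simp [hmd, e1]
    · have e2 : pvDfs inc dec jc n (PySem.Int.floordiv pos p.1 + 1)
          = pvDfs inc dec jc m (PySem.Int.floordiv pos p.1 + 1) :=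
        ih m _ (by omega) (by omega) (by omega)
      simp [hmd, e1, e2]

-- the collector only ever appends
theorem collectB_mono (jc : List (Int × Int)) :
    ∀ fuel : Nat, ∀ pos : Int, ∀ seen : List Int, ∀ x, x ∈ seen → x ∈ collectB jc fuel pos seen := by
  intro fuel
  induction fuel with
  | zero => intro pos seen x hx; simpa [collectB] using hx
  | succ n ih =>
    intro pos seen x hx
    rw [collectB_succ]
    split
    · exact hx
    · refine pvFoldlPres (fun s => x ∈ s) _ jc ?_ _ ?_
      · intro s p _ hxs
        unfold pvStep
        by_cases hmd : PySem.Int.mod pos p.1 ≠ 0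
        · rw [if_pos hmd]; exact ih _ _ _ (ih _ _ _ hxs)
        · rw [if_neg hmd]; exact ih _ _ _ hxs
      · simp [PySem.Set.mem_add, hx]

theorem foldl_pvStep_mono (jc : List (Int × Int)) (n : Nat) (pos : Int) (l : List (Int × Int))
    (s : List Int) (x : Int) (hx : x ∈ s) : x ∈ l.foldl (pvStep jc n pos) s := by
  refine pvFoldlPres (fun s => x ∈ s) _ l ?_ _ hx
  intro s p _ hxs
  unfold pvStep
  by_cases hmd : PySem.Int.mod pos p.1 ≠ 0
  · rw [if_pos hmd]; exact collectB_mono _ _ _ _ _ (collectB_mono _ _ _ _ _ hxs)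
  · rw [if_neg hmd]; exact collectB_mono _ _ _ _ _ hxs

theorem collectB_self (jc : List (Int × Int)) (fuel : Nat) (pos : Int) (seen : List Int)
    (h2 : 2 ≤ pos) (hf : 1 ≤ fuel) : pos ∈ collectB jc fuel pos seen := by
  obtain ⟨n, rfl⟩ : ∃ n, fuel = n + 1 := ⟨fuel - 1, by omega⟩
  rw [collectB_succ]
  split
  · rename_i h
    rcases h with h | h
    · omega
    · exact (PySem.Set.contains_iff _ _).1 h
  · exact foldl_pvStep_mono _ _ _ _ _ _ (by simp [PySem.Set.mem_add])

theorem collectB_nodup (jc : List (Int × Int)) :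
    ∀ fuel : Nat, ∀ pos : Int, ∀ seen : List Int, seen.Nodup → (collectB jc fuel pos seen).Nodup := by
  intro fuel
  induction fuel with
  | zero => intro pos seen h; simpa [collectB] using h
  | succ n ih =>
    intro pos seen h
    rw [collectB_succ]
    split
    · exact h
    · refine pvFoldlPres (fun s : List Int => s.Nodup) _ jc ?_ _ (PySem.Set.nodup_add _ _ h)
      intro s p _ hs
      unfold pvStep
      by_cases hmd : PySem.Int.mod pos p.1 ≠ 0
      · rw [if_pos hmd]; exact ih _ _ (ih _ _ hs)
      · rw [if_neg hmd]; exact ih _ _ hs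


-- x has all its ≥ 2 children inside S
def ClosedIn (jc : List (Int × Int)) (S : List Int) (x : Int) : Prop :=
  ∀ p ∈ jc, (2 ≤ PySem.Int.floordiv x p.1 → PySem.Int.floordiv x p.1 ∈ S) ∧
    (PySem.Int.mod x p.1 ≠ 0 → 2 ≤ PySem.Int.floordiv x p.1 + 1 → PySem.Int.floordiv x p.1 + 1 ∈ S)

theorem closedIn_mono (jc : List (Int × Int)) (S T : List Int) (hST : ∀ y ∈ S, y ∈ T) (x : Int)
    (h : ClosedIn jc S x) : ClosedIn jc T x := by
  intro p hp
  exact ⟨fun h2 => hST _ ((h p hp).1 h2), fun hm h2 => hST _ ((h p hp).2 hm h2)⟩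

-- during the expansion fold every new element is ≥ 2 and closed in the fold's result
theorem pvFoldClosed (jc : List (Int × Int)) (hJ : ∀ p ∈ jc, 2 ≤ p.1) (n : Nat) (pos : Int)
    (hp2 : 2 ≤ pos) (hn : pos.toNat ≤ n)
    (ih : ∀ (pos' : Int) (seen' : List Int), 0 ≤ pos' → pos'.toNat < n →
      ∀ x ∈ collectB jc n pos' seen', x ∈ seen' ∨ (2 ≤ x ∧ ClosedIn jc (collectB jc n pos' seen') x)) :
    ∀ l : List (Int × Int), (∀ p ∈ l, p ∈ jc) → ∀ s : List Int, ∀ x ∈ l.foldl (pvStep jc n pos) s,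
      x ∈ s ∨ (2 ≤ x ∧ ClosedIn jc (l.foldl (pvStep jc n pos) s) x) := by
  intro l
  induction l with
  | nil => intro _ s x hx; exact Or.inl hx
  | cons p t iht =>
    intro hsub s x hx
    simp only [List.foldl_cons] at hx ⊢
    have hpj := hsub p List.mem_cons_self
    obtain ⟨hdv0, hdvlt, hm0, hmlt, hplus⟩ := pvChild p.1 pos (hJ _ hpj) hp2
    have hdvb : (PySem.Int.floordiv pos p.1).toNat < n := by omega
    rcases iht (fun q hq => hsub q (List.mem_cons_of_mem _ hq)) (pvStep jc n pos s p) x hx with h | h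
    · simp only [pvStep] at h
      by_cases hmd : PySem.Int.mod pos p.1 ≠ 0
      · rw [if_pos hmd] at h
        have hstep : pvStep jc n pos s p
            = collectB jc n (PySem.Int.floordiv pos p.1 + 1) (collectB jc n (PySem.Int.floordiv pos p.1) s) := by
          simp only [pvStep, if_pos hmd]
        rcases ih _ _ (by omega) (by have := hplus hmd; omega) x h with h2 | h2
        · rcases ih _ s (by omega) hdvb x h2 with h3 | h3
          · exact Or.inl h3
          · refine Or.inr ⟨h3.1, closedIn_mono _ _ _ ?_ _ h3.2⟩
            intro y hy
            refine foldl_pvStep_mono _ _ _ _ _ _ ?_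
            rw [hstep]
            exact collectB_mono _ _ _ _ _ hy
        · refine Or.inr ⟨h2.1, closedIn_mono _ _ _ ?_ _ h2.2⟩
          intro y hy
          refine foldl_pvStep_mono _ _ _ _ _ _ ?_
          rw [hstep]
          exact hy
      · rw [if_neg hmd] at h
        have hstep : pvStep jc n pos s p = collectB jc n (PySem.Int.floordiv pos p.1) s := by
          simp only [pvStep, if_neg hmd]
        rcases ih _ s (by omega) hdvb x h with h2 | h2
        · exact Or.inl h2
        · refine Or.inr ⟨h2.1, closedIn_mono _ _ _ ?_ _ h2.2⟩
          intro y hy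
          refine foldl_pvStep_mono _ _ _ _ _ _ ?_
          rw [hstep]
          exact hy
    · exact Or.inr h

-- the element expanded by the fold has all its ≥ 2 children in the fold's result
theorem pvFoldChildren (jc : List (Int × Int)) (n : Nat) (pos : Int)
    (hn1 : 1 ≤ n) :
    ∀ l : List (Int × Int), ∀ s : List Int, ∀ p ∈ l,
      (2 ≤ PySem.Int.floordiv pos p.1 → PySem.Int.floordiv pos p.1 ∈ l.foldl (pvStep jc n pos) s) ∧
      (PySem.Int.mod pos p.1 ≠ 0 → 2 ≤ PySem.Int.floordiv pos p.1 + 1 →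
        PySem.Int.floordiv pos p.1 + 1 ∈ l.foldl (pvStep jc n pos) s) := by
  intro l
  induction l with
  | nil => intro s p hp; cases hp
  | cons q t iht =>
    intro s p hp
    simp only [List.foldl_cons]
    rcases List.mem_cons.1 hp with rfl | hpt
    · constructor
      · intro h2
        refine foldl_pvStep_mono _ _ _ _ _ _ ?_
        simp only [pvStep]
        split
        · exact collectB_mono _ _ _ _ _ (collectB_self _ _ _ _ h2 hn1)
        · exact collectB_self _ _ _ _ h2 hn1
      · intro hmd h2
        refine foldl_pvStep_mono _ _ _ _ _ _ ?_
        simp only [pvStep, if_pos hmd]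
        exact collectB_self _ _ _ _ h2 hn1
    · exact iht _ p hpt

-- every member of the collector's output is old or is ≥ 2 and closed in the output
theorem collectB_closed (jc : List (Int × Int)) (hJ : ∀ p ∈ jc, 2 ≤ p.1) :
    ∀ fuel : Nat, ∀ pos : Int, ∀ seen : List Int, 0 ≤ pos → pos.toNat < fuel →
      ∀ x ∈ collectB jc fuel pos seen,
        x ∈ seen ∨ (2 ≤ x ∧ ClosedIn jc (collectB jc fuel pos seen) x) := by
  intro fuel
  induction fuel with
  | zero => intro pos seen h0 h1; omega
  | succ n ih =>
    intro pos seen h0 h1 x hx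
    rw [collectB_succ] at hx ⊢
    by_cases hbr : pos ≤ 1 ∨ PySem.Set.contains seen pos = true
    · rw [if_pos hbr] at hx ⊢
      exact Or.inl hx
    rw [if_neg hbr] at hx ⊢
    have hp2 : 2 ≤ pos := by
      rcases not_or.1 hbr with ⟨h, _⟩; omega
    have hn : pos.toNat ≤ n := by omega
    rcases pvFoldClosed jc hJ n pos hp2 hn (fun p' s' a b => ih p' s' a b) jc (fun p hp => hp)
        (PySem.Set.add seen pos) x hx with h | h
    · rcases (PySem.Set.mem_add _ _ _).1 h with h2 | h2
      · exact Or.inl h2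
      · subst h2
        refine Or.inr ⟨hp2, ?_⟩
        intro p hp
        exact pvFoldChildren jc n x (by omega) jc _ p hp
    · exact Or.inr h

theorem pvDfs_zero (inc dec : Int) (jc : List (Int × Int)) : ∀ f : Nat, pvDfs inc dec jc f 0 = 0 := by
  intro f; cases f <;> simp [pvDfs]

theorem pvDfs_one (inc dec : Int) (jc : List (Int × Int)) : ∀ f : Nat, 1 ≤ f → pvDfs inc dec jc f 1 = inc := by
  intro f hf
  obtain ⟨n, rfl⟩ : ∃ n, f = n + 1 := ⟨f - 1, by omega⟩
  simp [pvDfs]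

-- inserts never disturb other keys
theorem foldl_dpStep_getD_of_not_mem (inc dec : Int) (jc : List (Int × Int)) :
    ∀ L : List Int, ∀ dp : PySem.Dict Int Int, ∀ z : Int, ¬ z ∈ L →
      (L.foldl (dpStep inc dec jc) dp).getD z 0 = dp.getD z 0 := by
  intro L
  induction L with
  | nil => intro dp z _; rfl
  | cons q t ih =>
    intro dp z hz
    simp only [List.foldl_cons]
    rw [ih _ _ (fun h => hz (List.mem_cons_of_mem _ h))]
    unfold dpStep
    exact PySem.Dict.getD_insert_of_ne _ _ _ (fun h : z = q => hz (by simp [h]))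


-- the DP pass: processing the sorted states left to right fills the table with pvDfs's values
theorem dp_fold (inc dec : Int) (jc : List (Int × Int)) (hJ : ∀ p ∈ jc, 2 ≤ p.1) (S : List Int) :
    ∀ L : List Int, ∀ dp : PySem.Dict Int Int,
      (∀ x ∈ L, 2 ≤ x ∧ ClosedIn jc S x) →
      L.Pairwise (· < ·) →
      (∀ y ∈ L, ∀ z ∈ S, z < y → ¬ z ∈ L → dp.getD z 0 = pvDfs inc dec jc (z.toNat + 1) z) →
      dp.getD 0 0 = 0 → dp.getD 1 0 = inc →
      ∀ y ∈ L, (L.foldl (dpStep inc dec jc) dp).getD y 0 = pvDfs inc dec jc (y.toNat + 1) y := by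
  intro L
  induction L with
  | nil => intro dp _ _ _ _ _ y hy; cases hy
  | cons pos tl ih =>
    intro dp HL hpw Hdp h0 h1 y hy
    obtain ⟨hp2, hcl⟩ := HL pos List.mem_cons_self
    have htlgt : ∀ z ∈ tl, pos < z := (List.pairwise_cons.1 hpw).1
    have hpwtl := (List.pairwise_cons.1 hpw).2
    -- every child the recurrence looks up is already correct in dp
    have hget : ∀ c : Int, 0 ≤ c → c < pos → (c = 0 ∨ c = 1 ∨ c ∈ S) →
        dp.getD c 0 = pvDfs inc dec jc pos.toNat c := by
      intro c hc0 hclt hcase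
      rcases hcase with rfl | rfl | hcS
      · rw [h0, pvDfs_zero]
      · rw [h1, pvDfs_one _ _ _ _ (by omega)]
      · have hnot : ¬ c ∈ pos :: tl := by
          intro h
          rcases List.mem_cons.1 h with rfl | h2
          · omega
          · exact absurd (htlgt c h2) (by omega)
        rw [Hdp pos List.mem_cons_self c hcS hclt hnot]
        exact pvDfs_mono inc dec jc hJ _ _ c hc0 (by omega) (by omega)
    -- the value inserted for pos is pvDfs's value at pos
    have hstep : dpStep inc dec jc dp pos = dp.insert pos (pvDfs inc dec jc (pos.toNat + 1) pos) := by
      unfold dpStep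
      congr 1
      have hunf : pvDfs inc dec jc (pos.toNat + 1) pos =
          jc.foldl (fun res p =>
            let dv := PySem.Int.floordiv pos p.1
            let md := PySem.Int.mod pos p.1
            let res1 := min res (pvDfs inc dec jc pos.toNat dv + p.2 + inc * md)
            if md ≠ 0 then min res1 (pvDfs inc dec jc pos.toNat (dv + 1) + p.2 + dec * (p.1 - md)) else res1)
            (pos * inc) := by
        rw [pvDfs, if_neg (by omega), if_neg (by omega)]
      rw [hunf]
      apply PySem.List.foldl_congr_mem
      intro acc p hp
      obtain ⟨hdv0, hdvlt, hm0, hmlt, hplus⟩ := pvChild p.1 pos (hJ p hp) hp2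
      dsimp only
      have e1 : dp.getD (PySem.Int.floordiv pos p.1) 0
          = pvDfs inc dec jc pos.toNat (PySem.Int.floordiv pos p.1) := by
        refine hget _ hdv0 hdvlt ?_
        by_cases h2 : 2 ≤ PySem.Int.floordiv pos p.1
        · exact Or.inr (Or.inr ((hcl p hp).1 h2))
        · omega
      by_cases hmd : PySem.Int.mod pos p.1 ≠ 0
      · have e2 : dp.getD (PySem.Int.floordiv pos p.1 + 1) 0
            = pvDfs inc dec jc pos.toNat (PySem.Int.floordiv pos p.1 + 1) := by
          refine hget _ (by omega) (hplus hmd) ?_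
          by_cases h2 : 2 ≤ PySem.Int.floordiv pos p.1 + 1
          · exact Or.inr (Or.inr ((hcl p hp).2 hmd h2))
          · omega
        rw [if_pos hmd, if_pos hmd, e1, e2]
      · rw [if_neg hmd, if_neg hmd, e1]
    simp only [List.foldl_cons]
    rcases List.mem_cons.1 hy with rfl | hyt
    · rw [hstep, foldl_dpStep_getD_of_not_mem _ _ _ tl _ y
        (fun h => absurd (htlgt y h) (lt_irrefl y))]
      exact PySem.Dict.getD_insert_self _ _ _ _
    · rw [hstep]
      refine ih _ (fun x hx => HL x (List.mem_cons_of_mem _ hx)) hpwtl ?_ ?_ ?_ y hyt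
      · intro y' hy' z hz hlt hnot
        by_cases hzpos : z = pos
        · subst hzpos
          rw [PySem.Dict.getD_insert_self _ _ _ _]
        · rw [PySem.Dict.getD_insert_of_ne _ _ _ hzpos]
          refine Hdp y' (List.mem_cons_of_mem _ hy') z hz hlt ?_
          intro h
          rcases List.mem_cons.1 h with rfl | h2
          · exact hzpos rfl
          · exact hnot h2
      · rw [PySem.Dict.getD_insert_of_ne _ _ _ (by omega : (0:Int) ≠ pos)]; exact h0
      · rw [PySem.Dict.getD_insert_of_ne _ _ _ (by omega : (1:Int) ≠ pos)]; exact h1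


-- the memo dict only ever holds already-proved values of pvDfs
def pvGoodMemo (inc dec : Int) (jc : List (Int × Int)) (memo : PySem.Dict Int Int) : Prop :=
  ∀ k v, memo.get? k = some v → 0 ≤ k ∧ v = pvDfs inc dec jc (k.toNat + 1) k

theorem pvGood_empty (inc dec : Int) (jc : List (Int × Int)) : pvGoodMemo inc dec jc PySem.Dict.empty := by
  intro k v h
  rw [PySem.Dict.get?_empty] at h
  cases h

theorem pvGood_insert (inc dec : Int) (jc : List (Int × Int)) (memo : PySem.Dict Int Int)
    (h : pvGoodMemo inc dec jc memo) (k : Int) (hk : 0 ≤ k) :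
    pvGoodMemo inc dec jc (memo.insert k (pvDfs inc dec jc (k.toNat + 1) k)) := by
  intro k' v hkv
  rw [PySem.Dict.get?_insert] at hkv
  split at hkv
  · rename_i he
    subst he
    cases hkv
    exact ⟨hk, rfl⟩
  · exact h k' v hkv

-- running the memoised fold tracks the pure fold and keeps the memo good
theorem pvFoldBridge (inc dec : Int) (jc : List (Int × Int)) (hJ : ∀ p ∈ jc, 2 ≤ p.1)
    (n : Nat) (pos : Int) (hp2 : 2 ≤ pos) (hn : pos.toNat ≤ n)
    (ihm : ∀ (pos' : Int) (memo' : PySem.Dict Int Int), 0 ≤ pos' → pos'.toNat < n →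
      pvGoodMemo inc dec jc memo' →
      (dfsA inc dec jc n pos' memo').1 = pvDfs inc dec jc (pos'.toNat + 1) pos' ∧
        pvGoodMemo inc dec jc (dfsA inc dec jc n pos' memo').2) :
    ∀ l : List (Int × Int), (∀ p ∈ l, p ∈ jc) → ∀ (res : Int) (memo : PySem.Dict Int Int),
      pvGoodMemo inc dec jc memo →
      (l.foldl (fun (acc : Int × PySem.Dict Int Int) p =>
          let dv := PySem.Int.floordiv pos p.1
          let md := PySem.Int.mod pos p.1
          let r1 := dfsA inc dec jc n dv acc.2
          let res1 := min acc.1 (r1.1 + p.2 + inc * md)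
          if md ≠ 0 then
            let r2 := dfsA inc dec jc n (dv + 1) r1.2
            (min res1 (r2.1 + p.2 + dec * (p.1 - md)), r2.2)
          else (res1, r1.2)) (res, memo)).1
        = l.foldl (fun res p =>
          let dv := PySem.Int.floordiv pos p.1
          let md := PySem.Int.mod pos p.1
          let res1 := min res (pvDfs inc dec jc pos.toNat dv + p.2 + inc * md)
          if md ≠ 0 then min res1 (pvDfs inc dec jc pos.toNat (dv + 1) + p.2 + dec * (p.1 - md)) else res1)
          res ∧
      pvGoodMemo inc dec jc (l.foldl (fun (acc : Int × PySem.Dict Int Int) p =>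
          let dv := PySem.Int.floordiv pos p.1
          let md := PySem.Int.mod pos p.1
          let r1 := dfsA inc dec jc n dv acc.2
          let res1 := min acc.1 (r1.1 + p.2 + inc * md)
          if md ≠ 0 then
            let r2 := dfsA inc dec jc n (dv + 1) r1.2
            (min res1 (r2.1 + p.2 + dec * (p.1 - md)), r2.2)
          else (res1, r1.2)) (res, memo)).2 := by
  intro l
  induction l with
  | nil => intro _ res memo hmemo; exact ⟨rfl, hmemo⟩
  | cons p t iht =>
    intro hsub res memo hmemo
    have hpj := hsub p List.mem_cons_self
    obtain ⟨hdv0, hdvlt, hm0, hmlt, hplus⟩ := pvChild p.1 pos (hJ _ hpj) hp2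
    have h1 := ihm (PySem.Int.floordiv pos p.1) memo hdv0 (by omega) hmemo
    have e1 : (dfsA inc dec jc n (PySem.Int.floordiv pos p.1) memo).1
        = pvDfs inc dec jc pos.toNat (PySem.Int.floordiv pos p.1) := by
      rw [h1.1]
      exact pvDfs_mono inc dec jc hJ _ _ _ hdv0 (by omega) (by omega)
    simp only [List.foldl_cons]
    by_cases hmd : PySem.Int.mod pos p.1 ≠ 0
    · have h2 := ihm (PySem.Int.floordiv pos p.1 + 1)
        (dfsA inc dec jc n (PySem.Int.floordiv pos p.1) memo).2 (by omega)
        (by have := hplus hmd; omega) h1.2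
      have e2 : (dfsA inc dec jc n (PySem.Int.floordiv pos p.1 + 1)
            (dfsA inc dec jc n (PySem.Int.floordiv pos p.1) memo).2).1
          = pvDfs inc dec jc pos.toNat (PySem.Int.floordiv pos p.1 + 1) := by
        rw [h2.1]
        exact pvDfs_mono inc dec jc hJ _ _ _ (by omega) (by omega) (by omega)
      simp only [if_pos hmd, e1, e2]
      exact iht (fun q hq => hsub q (List.mem_cons_of_mem _ hq)) _ _ h2.2
    · simp only [if_neg hmd, e1]
      exact iht (fun q hq => hsub q (List.mem_cons_of_mem _ hq)) _ _ h1.2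

-- the memoised port computes the pure recursion's value
theorem dfsA_memo (inc dec : Int) (jc : List (Int × Int)) (hJ : ∀ p ∈ jc, 2 ≤ p.1) :
    ∀ fuel : Nat, ∀ (pos : Int) (memo : PySem.Dict Int Int), 0 ≤ pos → pos.toNat < fuel →
      pvGoodMemo inc dec jc memo →
      (dfsA inc dec jc fuel pos memo).1 = pvDfs inc dec jc (pos.toNat + 1) pos ∧
        pvGoodMemo inc dec jc (dfsA inc dec jc fuel pos memo).2 := by
  intro fuel
  induction fuel with
  | zero => intro pos memo _ h1 _; omega
  | succ n ih =>
    intro pos memo hpos0 hposf hmemo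
    simp only [dfsA]
    cases hm : memo.get? pos with
    | some v =>
      simp only [hm]
      obtain ⟨hk, hv⟩ := hmemo pos v hm
      exact ⟨hv, hmemo⟩
    | none =>
      simp only [hm]
      by_cases h0 : pos = 0
      · subst h0
        rw [if_pos rfl]
        refine ⟨(pvDfs_zero inc dec jc _).symm, ?_⟩
        have := pvGood_insert inc dec jc memo hmemo 0 le_rfl
        rwa [pvDfs_zero] at this
      by_cases h1 : pos = 1
      · subst h1
        rw [if_neg (by norm_num), if_pos rfl]
        refine ⟨(pvDfs_one inc dec jc _ (by norm_num)).symm, ?_⟩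
        have := pvGood_insert inc dec jc memo hmemo 1 (by norm_num)
        rwa [pvDfs_one inc dec jc _ (by norm_num)] at this
      rw [if_neg h0, if_neg h1]
      have hp2 : 2 ≤ pos := by omega
      obtain ⟨hr1, hr2⟩ := pvFoldBridge inc dec jc hJ n pos hp2 (by omega)
        (fun p' m' a b c => ih p' m' a b c) jc (fun p hp => hp) (pos * inc) memo hmemo
      have hpv : pvDfs inc dec jc (pos.toNat + 1) pos
          = jc.foldl (fun res p =>
              let dv := PySem.Int.floordiv pos p.1
              let md := PySem.Int.mod pos p.1
              let res1 := min res (pvDfs inc dec jc pos.toNat dv + p.2 + inc * md)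
              if md ≠ 0 then min res1 (pvDfs inc dec jc pos.toNat (dv + 1) + p.2 + dec * (p.1 - md)) else res1)
              (pos * inc) := by
        rw [pvDfs, if_neg h0, if_neg h1]
      refine ⟨by rw [hr1, ← hpv], ?_⟩
      have := pvGood_insert inc dec jc _ hr2 pos hpos0
      rwa [show pvDfs inc dec jc (pos.toNat + 1) pos = _ from hpv.trans hr1.symm] at this

-- ===== VERDICT (by name: the statement is the Claim_ definition above) =====
theorem busRapidTransit_spec : Claim_equal_busRapidTransit := by
  intro target inc dec jump cost _ hpre
  obtain ⟨ht0, hrest⟩ := hpre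
  unfold Spec_busRapidTransit busRapidTransit busRapidTransit_alt
  by_cases h2 : 2 ≤ target
  · have hJ : ∀ p ∈ jump.zip cost, 2 ≤ p.1 := hrest.resolve_left (by omega)
    have hnd : (collectB (jump.zip cost) (target.toNat + 1) target []).Nodup :=
      collectB_nodup _ _ _ _ List.nodup_nil
    have hclosed := collectB_closed (jump.zip cost) hJ (target.toNat + 1) target [] ht0 (by omega)
    have hSprop : ∀ x ∈ collectB (jump.zip cost) (target.toNat + 1) target [],
        2 ≤ x ∧ ClosedIn (jump.zip cost) (collectB (jump.zip cost) (target.toNat + 1) target []) x :=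
      fun x hx => (hclosed x hx).resolve_left (by simp)
    have htS : target ∈ collectB (jump.zip cost) (target.toNat + 1) target [] :=
      collectB_self _ _ _ _ h2 (by omega)
    have hperm : (PySem.List.sorted (collectB (jump.zip cost) (target.toNat + 1) target [])
        (fun x => x) false).Perm (collectB (jump.zip cost) (target.toNat + 1) target []) :=
      PySem.List.sorted_perm _ _ _
    have hndL := hperm.nodup_iff.2 hnd
    have hplt : (PySem.List.sorted (collectB (jump.zip cost) (target.toNat + 1) target [])
        (fun x => x) false).Pairwise (· < ·) :=
      ((PySem.List.sorted_pairwise _ _).and hndL).imp (fun h => lt_of_le_of_ne h.1 h.2)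
    have hmain := dp_fold inc dec (jump.zip cost) hJ
      (collectB (jump.zip cost) (target.toNat + 1) target [])
      (PySem.List.sorted (collectB (jump.zip cost) (target.toNat + 1) target []) (fun x => x) false)
      ((PySem.Dict.empty.insert (0 : Int) (0 : Int)).insert 1 inc)
      (fun x hx => hSprop x (hperm.mem_iff.1 hx))
      hplt
      (fun y _ z hz _ hnot => absurd (hperm.mem_iff.2 hz) hnot)
      (by rw [PySem.Dict.getD_insert_of_ne _ _ _ (by norm_num : (0 : Int) ≠ 1)]
          exact PySem.Dict.getD_insert_self _ _ _ _)
      (PySem.Dict.getD_insert_self _ _ _ _)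
      target (hperm.mem_iff.2 htS)
    have hbridge := (dfsA_memo inc dec (jump.zip cost) hJ (target.toNat + 1) target
      PySem.Dict.empty ht0 (by omega) (pvGood_empty inc dec (jump.zip cost))).1
    show PySem.Int.mod (dfsA inc dec (jump.zip cost) (target.toNat + 1) target PySem.Dict.empty).1 1000000007
      = PySem.Int.mod (((PySem.List.sorted (collectB (jump.zip cost) (target.toNat + 1) target [])
          (fun x => x) false).foldl (dpStep inc dec (jump.zip cost))
          ((PySem.Dict.empty.insert (0 : Int) (0 : Int)).insert 1 inc)).getD target 0) 1000000007
    rw [hmain, hbridge]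
  · have hcol : ∀ jc : List (Int × Int), collectB jc (target.toNat + 1) target [] = [] := by
      intro jc
      obtain ⟨n, hn⟩ : ∃ n, target.toNat + 1 = n + 1 := ⟨target.toNat, rfl⟩
      rw [hn, collectB_succ, if_pos (Or.inl (by omega))]
    have : target = 0 ∨ target = 1 := by omega
    rcases this with rfl | rfl
    · show PySem.Int.mod (dfsA inc dec (jump.zip cost) ((0 : Int).toNat + 1) 0 PySem.Dict.empty).1 1000000007
        = PySem.Int.mod (((PySem.List.sorted (collectB (jump.zip cost) ((0 : Int).toNat + 1) 0 [])
            (fun x => x) false).foldl (dpStep inc dec (jump.zip cost))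
            ((PySem.Dict.empty.insert (0 : Int) (0 : Int)).insert 1 inc)).getD 0 0) 1000000007
      rw [hcol]
      have hA : (dfsA inc dec (jump.zip cost) ((0 : Int).toNat + 1) 0 PySem.Dict.empty).1 = 0 := by
        simp [dfsA, PySem.Dict.get?_empty]
      rw [hA]
      have : (PySem.List.sorted ([] : List Int) (fun x => x) false) = [] := rfl
      rw [this]
      simp only [List.foldl_nil]
      rw [PySem.Dict.getD_insert_of_ne _ _ _ (by norm_num : (0 : Int) ≠ 1)]
      rw [PySem.Dict.getD_insert_self _ _ _ _]
    · show PySem.Int.mod (dfsA inc dec (jump.zip cost) ((1 : Int).toNat + 1) 1 PySem.Dict.empty).1 1000000007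
        = PySem.Int.mod (((PySem.List.sorted (collectB (jump.zip cost) ((1 : Int).toNat + 1) 1 [])
            (fun x => x) false).foldl (dpStep inc dec (jump.zip cost))
            ((PySem.Dict.empty.insert (0 : Int) (0 : Int)).insert 1 inc)).getD 1 0) 1000000007
      rw [hcol]
      have hA : (dfsA inc dec (jump.zip cost) ((1 : Int).toNat + 1) 1 PySem.Dict.empty).1 = inc := by
        simp [dfsA, PySem.Dict.get?_empty]
      rw [hA]
      have : (PySem.List.sorted ([] : List Int) (fun x => x) false) = [] := rfl
      rw [this]
      simp only [List.foldl_nil]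
      rw [PySem.Dict.getD_insert_self _ _ _ _]
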